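-- pv_equiv track=rewrite | github.com/prasanthsariki/python | index.py | duplicate_digit_exists
-- ===== SOURCE A (Python) =====
-- def duplicate_digit_exists(num1):
--     curr_list  = []
--     while num1 > 0:
--         rem  = num1 % 10
--
--         if rem in curr_list:
--             return True
--         curr_list.append(rem)
--         num1  = num1 // 10
--     return False
-- ===== SOURCE B (Python) =====
-- def duplicate_digit_exists(num1):
--     if num1 <= 0:
--         return False
--     s = str(num1)
--     return len(set(s)) != len(s)
-- ===== Notes on version B (the rewrite author's own statement) =====
-- stated objective: simpler
-- what changed: The digit-by-digit arithmetic loop with an early-return membership scan over a growing list is replaced by converting the number to its decimal string once and comparing the count of distinct characters with the string length.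
import Mathlib
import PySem

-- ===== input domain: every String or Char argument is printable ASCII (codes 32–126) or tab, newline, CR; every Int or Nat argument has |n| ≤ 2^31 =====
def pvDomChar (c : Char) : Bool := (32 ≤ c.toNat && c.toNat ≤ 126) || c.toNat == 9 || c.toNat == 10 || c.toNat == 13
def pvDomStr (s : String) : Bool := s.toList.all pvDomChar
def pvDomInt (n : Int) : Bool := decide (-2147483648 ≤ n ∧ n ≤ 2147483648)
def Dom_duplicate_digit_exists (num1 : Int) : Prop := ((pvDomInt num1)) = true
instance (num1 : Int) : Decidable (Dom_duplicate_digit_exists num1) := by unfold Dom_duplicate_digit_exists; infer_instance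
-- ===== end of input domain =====

-- B replaces A's per-digit early-exit membership loop by one str() conversion and a
-- distinct-count comparison (objective: simpler).

-- ===== PORT A =====
-- the while loop: state (num1, curr_list); early return True on a repeated remainder
def duplicate_digit_exists_loop (num1 : Int) (curr_list : List Int) : Bool :=
  if num1 > 0 then
    let rem := PySem.Int.mod num1 10
    if curr_list.contains rem then true
    else duplicate_digit_exists_loop (PySem.Int.floordiv num1 10) (curr_list ++ [rem])
  else false
termination_by num1.toNat
decreasing_by
  simp only [PySem.Int.floordiv, Int.fdiv_eq_ediv]
  omega

def duplicate_digit_exists (num1 : Int) : Bool :=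
  duplicate_digit_exists_loop num1 []

-- ===== PORT B =====
def duplicate_digit_exists_alt (num1 : Int) : Bool :=
  if num1 ≤ 0 then false
  else
    let s := PySem.Int.toStr num1
    decide (PySem.Set.len (PySem.Set.ofList s.toList) ≠ PySem.Str.len s)

-- ===== PRECONDITION & SPEC =====
def Spec_duplicate_digit_exists (num1 : Int) (out : Bool) : Prop := out = duplicate_digit_exists_alt num1
instance (num1 : Int) (out : Bool) : Decidable (Spec_duplicate_digit_exists num1 out) := by unfold Spec_duplicate_digit_exists; infer_instance

-- ===== CLAIM (what is proved, stated in full; the proofs are below) =====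
def Claim_equal_duplicate_digit_exists : Prop := ∀ (num1 : Int), Dom_duplicate_digit_exists num1 → Spec_duplicate_digit_exists num1 (duplicate_digit_exists num1)

-- ===== LEMMAS AND PROOFS =====

-- Set.ofList keeps a sublist of its input
theorem pv_foldl_add_sublist {α : Type} [BEq α] (xs : List α) :
    ∀ s : List α, ∃ t, t.Sublist xs ∧ List.foldl PySem.Set.add s xs = s ++ t := by
  induction xs with
  | nil => intro s; exact ⟨[], List.Sublist.refl _, by simp⟩
  | cons x xs ih =>
    intro s
    by_cases h : s.contains x
    · obtain ⟨t, hsub, heq⟩ := ih s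
      exact ⟨t, hsub.cons x, by simp [List.foldl, PySem.Set.add, h, heq]⟩
    · obtain ⟨t, hsub, heq⟩ := ih (s ++ [x])
      exact ⟨x :: t, hsub.cons₂ x, by simp [List.foldl, PySem.Set.add, h, heq]⟩

theorem pv_foldl_add_of_nodup {α : Type} [BEq α] [LawfulBEq α] (xs : List α) :
    ∀ s : List α, (∀ a ∈ xs, a ∉ s) → xs.Nodup → List.foldl PySem.Set.add s xs = s ++ xs := by
  induction xs with
  | nil => intro s _ _; simp
  | cons x xs ih =>
    intro s hdisj hnd
    have hx : ¬ s.contains x := by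
      simp only [List.contains_iff_mem]
      exact fun hm => hdisj x (by simp) hm
    have := ih (s ++ [x])
      (by
        intro a ha
        simp only [List.mem_append, List.mem_singleton]
        rintro (h1 | rfl)
        · exact hdisj a (by simp [ha]) h1
        · exact (List.nodup_cons.mp hnd).1 ha)
      (List.nodup_cons.mp hnd).2
    simp only [List.foldl, PySem.Set.add, PySem.Set.contains, hx] at this ⊢
    simpa [List.append_assoc] using this

theorem pv_len_ofList_eq_iff {α : Type} [BEq α] [LawfulBEq α] (xs : List α) :
    (PySem.Set.ofList xs).length = xs.length ↔ xs.Nodup := by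
  constructor
  · intro hlen
    obtain ⟨t, hsub, heq⟩ := pv_foldl_add_sublist xs ([] : List α)
    have ht : PySem.Set.ofList xs = t := by simpa [PySem.Set.ofList, PySem.Set.empty] using heq
    have : t = xs := hsub.eq_of_length (by rw [← ht]; exact hlen)
    have hnd := PySem.Set.nodup_ofList xs
    rwa [ht, this] at hnd
  · intro hnd
    have := pv_foldl_add_of_nodup xs ([] : List α) (by simp) hnd
    simp [PySem.Set.ofList, PySem.Set.empty, this]

-- Nat.toDigits via Nat.digits
theorem pv_toDigitsCore_eq : ∀ (fuel n : Nat) (ds : List Char), n ≠ 0 → n < fuel →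
    Nat.toDigitsCore 10 fuel n ds = ((Nat.digits 10 n).map Nat.digitChar).reverse ++ ds := by
  intro fuel
  induction fuel with
  | zero => intro n ds _ h; omega
  | succ f ih =>
    intro n ds hn hlt
    rw [show Nat.toDigitsCore 10 (f + 1) n ds
        = (if n / 10 = 0 then (n % 10).digitChar :: ds
           else Nat.toDigitsCore 10 f (n / 10) ((n % 10).digitChar :: ds)) from rfl]
    rw [Nat.digits_def' (by norm_num : 1 < 10) (Nat.pos_of_ne_zero hn)]
    by_cases h10 : n / 10 = 0
    · simp [h10, Nat.digits_zero]
    · have : n / 10 < f := by omega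
      rw [if_neg h10, ih (n / 10) _ h10 this]
      simp

theorem pv_toDigits_eq (n : Nat) (hn : n ≠ 0) :
    Nat.toDigits 10 n = ((Nat.digits 10 n).map Nat.digitChar).reverse := by
  have := pv_toDigitsCore_eq (n + 1) n [] hn (by omega)
  simpa [Nat.toDigits] using this

theorem pv_digitChar_inj : ∀ a < 10, ∀ b < 10, Nat.digitChar a = Nat.digitChar b → a = b := by
  decide

theorem pv_nodup_map_digitChar (m : Nat) :
    ((Nat.digits 10 m).map Nat.digitChar).Nodup ↔ (Nat.digits 10 m).Nodup := by
  constructor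
  · exact List.Nodup.of_map _
  · intro h
    exact h.map_on (fun a ha b hb =>
      pv_digitChar_inj a (Nat.digits_lt_base (by norm_num) ha) b
        (Nat.digits_lt_base (by norm_num) hb))

theorem pv_nodup_map_intCast (m : Nat) :
    ((Nat.digits 10 m).map (fun d : Nat => (d : Int))).Nodup ↔ (Nat.digits 10 m).Nodup := by
  constructor
  · exact List.Nodup.of_map _
  · intro h
    exact h.map_on (fun a _ b _ hab => by exact_mod_cast hab)

-- characterisation of A's loop
theorem pv_loopA_eq (m : Nat) : ∀ seen : List Int, seen.Nodup →
    duplicate_digit_exists_loop (m : Int) seen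
      = !decide ((seen ++ (Nat.digits 10 m).map (fun d : Nat => (d : Int))).Nodup) := by
  induction m using Nat.strong_induction_on with
  | _ m ih =>
    intro seen hseen
    by_cases hm : m = 0
    · subst hm
      rw [duplicate_digit_exists_loop]
      simp [hseen]
    · rw [duplicate_digit_exists_loop]
      have hpos : (0 : Int) < (m : Int) := by exact_mod_cast Nat.pos_of_ne_zero hm
      rw [if_pos hpos]
      have hmod : PySem.Int.mod (m : Int) 10 = ((m % 10 : Nat) : Int) := by
        exact_mod_cast PySem.Int.mod_natCast m 10
      have hdiv : PySem.Int.floordiv (m : Int) 10 = ((m / 10 : Nat) : Int) := by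
        exact_mod_cast PySem.Int.floordiv_natCast m 10
      rw [Nat.digits_def' (by norm_num : 1 < 10) (Nat.pos_of_ne_zero hm)]
      simp only [hmod, List.map_cons]
      by_cases hmem : ((m % 10 : Nat) : Int) ∈ seen
      · rw [if_pos (by simpa using hmem)]
        have : ¬ (seen ++ ((m % 10 : Nat) : Int) ::
            (Nat.digits 10 (m / 10)).map (fun d : Nat => (d : Int))).Nodup := by
          rw [List.nodup_append]
          rintro ⟨-, -, hdisj⟩
          exact hdisj _ hmem _ (by simp) rfl
        simp only [this, decide_false, Bool.not_false]
      · rw [if_neg (by simpa using hmem)]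
        have hnd2 : (seen ++ [((m % 10 : Nat) : Int)]).Nodup := by
          rw [List.nodup_append]
          refine ⟨hseen, List.nodup_singleton _, ?_⟩
          intro a ha b hb
          simp only [List.mem_singleton] at hb
          subst hb
          exact fun hab => hmem (hab ▸ ha)
        rw [hdiv, ih (m / 10) (by omega) (seen ++ [((m % 10 : Nat) : Int)]) hnd2]
        simp [List.append_assoc]

-- ===== VERDICT (by name: the statement is the Claim_ definition above) =====
theorem duplicate_digit_exists_spec : Claim_equal_duplicate_digit_exists := by
  intro num1 _
  unfold Spec_duplicate_digit_exists duplicate_digit_exists duplicate_digit_exists_alt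
  by_cases h : num1 ≤ 0
  · rw [duplicate_digit_exists_loop]
    simp [h, show ¬ num1 > 0 by omega]
  · have hpos : 0 < num1 := by omega
    rw [if_neg h]
    set m := num1.toNat with hm
    have hcast : (m : Int) = num1 := Int.toNat_of_nonneg (by omega)
    have hm0 : m ≠ 0 := by omega
    have hA : duplicate_digit_exists_loop num1 []
        = !decide ((Nat.digits 10 m).Nodup) := by
      rw [← hcast, pv_loopA_eq m [] (by simp)]
      simp [pv_nodup_map_intCast]
    rw [hA]
    have hchars : (PySem.Int.toStr num1).toList
        = ((Nat.digits 10 m).map Nat.digitChar).reverse := by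
      rw [PySem.Int.toList_toStr]
      unfold PySem.Int.toChars
      rw [if_neg (show ¬ num1 < 0 by omega), ← hm, pv_toDigits_eq m hm0]
    show _ = decide (PySem.Set.len (PySem.Set.ofList (PySem.Int.toStr num1).toList)
        ≠ PySem.Str.len (PySem.Int.toStr num1))
    rw [hchars]
    simp only [PySem.Set.len, PySem.Str.len, ne_eq, Nat.cast_inj]
    have hiff : ((PySem.Set.ofList (((Nat.digits 10 m).map Nat.digitChar).reverse)).length
          = (((Nat.digits 10 m).map Nat.digitChar).reverse).length)
        ↔ (Nat.digits 10 m).Nodup := by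
      rw [pv_len_ofList_eq_iff, List.nodup_reverse, pv_nodup_map_digitChar]
    rw [hchars]
    simp only [hiff]
    simp [decide_not]
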